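-- pv_equiv track=rewrite | github.com/TheDarkLightX/TauLang-Experiments | scripts/run_tau_io_rebuild_regression.py | summarize_update_stats
-- ===== SOURCE A (Python) =====
-- def summarize_update_stats(update_stats: list[dict[str, object]]) -> dict[str, int]:
--     accepted = [row for row in update_stats if int(row.get("accepted", 0)) == 1]
--     return {
--         "accepted_updates": len(accepted),
--         "input_rebuild_skipped": sum(
--             int(row.get("input_rebuild_skipped", 0)) for row in accepted
--         ),
--         "output_rebuild_skipped": sum(
--             int(row.get("output_rebuild_skipped", 0)) for row in accepted
--         ),
--     }
-- ===== SOURCE B (Python) =====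
-- def summarize_update_stats(update_stats: list[dict[str, object]]) -> dict[str, int]:
--     def leaf(row):
--         if int(row.get("accepted", 0)) == 1:
--             return {
--                 "accepted_updates": 1,
--                 "input_rebuild_skipped": int(row.get("input_rebuild_skipped", 0)),
--                 "output_rebuild_skipped": int(row.get("output_rebuild_skipped", 0)),
--             }
--         return {"accepted_updates": 0, "input_rebuild_skipped": 0, "output_rebuild_skipped": 0}
--
--     def go(chunk):
--         if not chunk:
--             return {"accepted_updates": 0, "input_rebuild_skipped": 0, "output_rebuild_skipped": 0}
--         if len(chunk) == 1:
--             return leaf(chunk[0])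
--         mid = len(chunk) // 2
--         left = go(chunk[:mid])
--         right = go(chunk[mid:])
--         return {k: left[k] + right[k] for k in left}
--
--     return go(update_stats)
-- ===== Notes on version B (the rewrite author's own statement) =====
-- stated objective: alternative
-- what changed: Replaces the filter-then-two-sums linear scans with a divide-and-conquer recursion: each row is mapped to a per-row summary dict and summaries of the two halves are merged key-wise by addition.
import Mathlib
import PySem

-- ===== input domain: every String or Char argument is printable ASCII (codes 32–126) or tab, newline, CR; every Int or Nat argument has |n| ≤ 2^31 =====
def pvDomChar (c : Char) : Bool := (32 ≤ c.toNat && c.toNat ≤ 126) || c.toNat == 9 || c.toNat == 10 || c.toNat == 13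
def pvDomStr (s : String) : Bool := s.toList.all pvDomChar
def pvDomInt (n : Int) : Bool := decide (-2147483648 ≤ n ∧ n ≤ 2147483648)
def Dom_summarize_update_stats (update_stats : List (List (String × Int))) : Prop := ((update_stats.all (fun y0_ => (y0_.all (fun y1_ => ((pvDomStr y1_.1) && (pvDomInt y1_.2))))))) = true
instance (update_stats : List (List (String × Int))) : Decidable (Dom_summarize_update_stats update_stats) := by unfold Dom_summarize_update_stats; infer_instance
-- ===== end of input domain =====

-- B replaces A's filter plus two generator sums with a divide-and-conquer recursion that
-- merges half-summaries key-wise by addition (objective: alternative; same value, different algorithm).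


-- ===== PORT A =====
def summarize_update_stats (update_stats : List (List (String × Int))) : List (String × Int) :=
  let accepted := update_stats.filter (fun row => PySem.Dict.getD (PySem.Dict.mk row) "accepted" 0 == 1)
  [("accepted_updates", (accepted.length : Int)),
   ("input_rebuild_skipped", (accepted.map (fun row => PySem.Dict.getD (PySem.Dict.mk row) "input_rebuild_skipped" 0)).sum),
   ("output_rebuild_skipped", (accepted.map (fun row => PySem.Dict.getD (PySem.Dict.mk row) "output_rebuild_skipped" 0)).sum)]

-- ===== PORT B =====
-- per-row summary dict (keys in fixed order, as in Source B's leaf)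
def pvLeaf (row : List (String × Int)) : List (String × Int) :=
  if PySem.Dict.getD (PySem.Dict.mk row) "accepted" 0 == 1 then
    [("accepted_updates", 1),
     ("input_rebuild_skipped", PySem.Dict.getD (PySem.Dict.mk row) "input_rebuild_skipped" 0),
     ("output_rebuild_skipped", PySem.Dict.getD (PySem.Dict.mk row) "output_rebuild_skipped" 0)]
  else [("accepted_updates", 0), ("input_rebuild_skipped", 0), ("output_rebuild_skipped", 0)]

-- key-wise merge by addition ({k: left[k] + right[k] for k in left})
def pvMerge (l r : List (String × Int)) : List (String × Int) :=
  l.map (fun kv => (kv.1, kv.2 + PySem.Dict.getD (PySem.Dict.mk r) kv.1 0))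

-- divide-and-conquer over the list of rows (Source B's go)
def pvGo (chunk : List (List (String × Int))) : List (String × Int) :=
  if chunk = [] then
    [("accepted_updates", 0), ("input_rebuild_skipped", 0), ("output_rebuild_skipped", 0)]
  else if h1 : chunk.length = 1 then
    pvLeaf chunk.headI
  else
    let mid := chunk.length / 2
    pvMerge (pvGo (chunk.take mid)) (pvGo (chunk.drop mid))
termination_by chunk.length
decreasing_by
  · rename_i h0
    have hz : chunk.length ≠ 0 := by simpa using h0
    simp only [List.length_take]; omega
  · rename_i h0
    have hz : chunk.length ≠ 0 := by simpa using h0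
    simp only [List.length_drop]; omega

def summarize_update_stats_alt (update_stats : List (List (String × Int))) : List (String × Int) :=
  pvGo update_stats

-- ===== PRECONDITION & SPEC =====
def Spec_summarize_update_stats (update_stats : List (List (String × Int))) (out : List (String × Int)) : Prop := out = summarize_update_stats_alt update_stats
instance (update_stats : List (List (String × Int))) (out : List (String × Int)) : Decidable (Spec_summarize_update_stats update_stats out) := by unfold Spec_summarize_update_stats; infer_instance

-- ===== CLAIM (what is proved, stated in full; the proofs are below) =====
def Claim_equal_summarize_update_stats : Prop := ∀ (update_stats : List (List (String × Int))), Dom_summarize_update_stats update_stats → Spec_summarize_update_stats update_stats (summarize_update_stats update_stats)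

-- ===== LEMMAS AND PROOFS =====

theorem summ_append (l r : List (List (String × Int))) :
    summarize_update_stats (l ++ r) = pvMerge (summarize_update_stats l) (summarize_update_stats r) := by
  simp [summarize_update_stats, pvMerge, List.filter_append, PySem.Dict.getD, PySem.Dict.get?,
    List.find?]

theorem pvGo_eq (chunk : List (List (String × Int))) :
    pvGo chunk = summarize_update_stats chunk := by
  fun_induction pvGo chunk with
  | case1 => simp [summarize_update_stats]
  | case2 chunk h0 h1 =>
    match chunk, h1 with
    | [row], _ =>
      simp only [summarize_update_stats, pvLeaf, List.headI, List.filter]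
      cases hb : (PySem.Dict.getD (PySem.Dict.mk row) "accepted" 0 == 1) <;> simp
  | case3 chunk h0 h1 mid ihl ihr =>
    rw [ihl, ihr, ← summ_append, List.take_append_drop]

-- ===== VERDICT (by name: the statement is the Claim_ definition above) =====
theorem summarize_update_stats_spec : Claim_equal_summarize_update_stats := by
  intro us _
  show summarize_update_stats us = summarize_update_stats_alt us
  rw [summarize_update_stats_alt, pvGo_eq]
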